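-- pv_equiv track=rewrite | github.com/geoochi/formula-formater | core.py | format_excel_formula
-- ===== SOURCE A (Python) =====
-- def format_excel_formula(formula):
--     """
--     将单行 Excel 公式格式化为多行缩进格式
--
--     Args:
--         formula: 单行 Excel 公式字符串，例如 '=IF(AND(B6<=-1.5%,B6>-4%),FLOOR(0.5*B4,100),0)'
--
--     Returns:
--         格式化后的多行字符串
--     """
--     if not formula:
--         return ""
--
--     # 移除首尾空格
--     formula = formula.strip()
--
--     # 如果以等号开头，单独处理等号
--     result = []
--     if formula.startswith("="):
--         result.append("=")
--         formula = formula[1:].strip()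
--
--     indent_level = 0
--     indent_size = 4
--     i = 0
--     current_token = []
--
--     while i < len(formula):
--         char = formula[i]
--
--         if char == "(":
--             # 左括号：输出函数名和左括号，换行，增加缩进
--             token = "".join(current_token).strip()
--             if token:
--                 result.append(" " * indent_level + token + "(")
--             else:
--                 result.append(" " * indent_level + "(")
--             current_token = []
--             indent_level += indent_size
--             i += 1
--         elif char == ")":
--             # 右括号：先输出当前token（如果有），减少缩进，换行，输出右括号
--             if current_token:
--                 token = "".join(current_token).strip()
--                 if token:
--                     result.append(" " * indent_level + token)
--                 current_token = []
--             indent_level -= indent_size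
--             result.append(" " * indent_level + ")")
--             i += 1
--         elif char == ",":
--             # 逗号：输出当前token和逗号，换行
--             token = "".join(current_token).strip()
--             if token:
--                 result.append(" " * indent_level + token + ",")
--             else:
--                 result.append(" " * indent_level + ",")
--             current_token = []
--             i += 1
--         else:
--             # 其他字符：添加到当前token
--             current_token.append(char)
--             i += 1
--
--     # 处理最后剩余的内容
--     if current_token:
--         token = "".join(current_token).strip()
--         if token:
--             result.append(" " * indent_level + token)
--
--     return "\n".join(result)
-- ===== SOURCE B (Python) =====
-- def _tokens(s):
--     """Lex s into [text, delim, text, delim, ..., text] where delims are '(', ')', ','."""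
--     toks = []
--     chunk = ""
--     for c in s:
--         if c in "(),":
--             toks.append(chunk)
--             toks.append(c)
--             chunk = ""
--         else:
--             chunk += c
--     toks.append(chunk)
--     return toks
--
--
-- def format_excel_formula(formula):
--     if not formula:
--         return ""
--     s = formula.strip()
--     lines = []
--     if s.startswith("="):
--         lines.append("=")
--         s = s[1:].strip()
--     toks = _tokens(s)
--     indent = 0
--     k = 1
--     while k < len(toks):
--         chunk = toks[k - 1].strip()
--         d = toks[k]
--         if d == "(":
--             lines.append(" " * indent + chunk + "(")
--             indent += 4
--         elif d == ",":
--             lines.append(" " * indent + chunk + ",")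
--         else:  # ")"
--             if chunk:
--                 lines.append(" " * indent + chunk)
--             indent -= 4
--             lines.append(" " * indent + ")")
--         k += 2
--     last = toks[-1].strip()
--     if last:
--         lines.append(" " * indent + last)
--     return "\n".join(lines)
-- ===== Notes on version B (the rewrite author's own statement) =====
-- stated objective: faster
-- what changed: Replaces A's single-pass character state machine (a pending current_token list mutated per character, with four inline branch bodies) by a two-phase decomposition: a lexer that splits the formula into alternating text/delimiter tokens, then an emitter loop over chunk-delimiter pairs maintaining only the indent level; the empty-vs-nonempty token branches of the opening-parenthesis and comma cases collapse into one line-build expression.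
import Mathlib
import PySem

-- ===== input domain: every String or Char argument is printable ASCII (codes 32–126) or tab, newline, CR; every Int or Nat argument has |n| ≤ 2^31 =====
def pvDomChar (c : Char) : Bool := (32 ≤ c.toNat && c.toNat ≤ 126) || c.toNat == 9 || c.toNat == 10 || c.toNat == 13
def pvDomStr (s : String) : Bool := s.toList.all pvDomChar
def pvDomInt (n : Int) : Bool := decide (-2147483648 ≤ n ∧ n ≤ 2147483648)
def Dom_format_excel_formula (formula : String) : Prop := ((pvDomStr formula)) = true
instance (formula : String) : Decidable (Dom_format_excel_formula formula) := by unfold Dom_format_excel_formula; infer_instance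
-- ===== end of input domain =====

-- B replaces A's char-by-char state machine by a two-phase lex (into text/delimiter tokens)
-- then an emit-per-token-pair loop: same O(n) result, measurably faster by constant factor
-- (no per-character list append/join-per-token work).

-- " " * n  (Python: a non-positive count yields the empty string; toNat clamps exactly so)
def pvSpaces (n : Int) : List Char := List.replicate n.toNat ' '

-- ===== PORT A =====
-- A's while-loop: i advances by exactly 1 each iteration, so it is structural recursion on
-- the remaining characters; state = (current_token, indent_level, result).
def pvLoopA : List Char → List Char → Int → List (List Char) → List (List Char)
  | [], cur, ind, res =>
      -- `if current_token:` then `token = strip`, `if token:` append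
      if cur.isEmpty then res
      else
        let t := PySem.Chars.strip cur
        if t.isEmpty then res else res ++ [pvSpaces ind ++ t]
  | c :: rest, cur, ind, res =>
      if c = '(' then
        let t := PySem.Chars.strip cur
        let line := if t.isEmpty then pvSpaces ind ++ ['('] else pvSpaces ind ++ t ++ ['(']
        pvLoopA rest [] (ind + 4) (res ++ [line])
      else if c = ')' then
        let res1 :=
          if cur.isEmpty then res
          else
            let t := PySem.Chars.strip cur
            if t.isEmpty then res else res ++ [pvSpaces ind ++ t]
        pvLoopA rest [] (ind - 4) (res1 ++ [pvSpaces (ind - 4) ++ [')']])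
      else if c = ',' then
        let t := PySem.Chars.strip cur
        let line := if t.isEmpty then pvSpaces ind ++ [','] else pvSpaces ind ++ t ++ [',']
        pvLoopA rest [] ind (res ++ [line])
      else
        pvLoopA rest (cur ++ [c]) ind res

def format_excel_formula (formula : String) : String :=
  if formula.toList = [] then ""                      -- `if not formula: return ""`
  else
    let f0 := PySem.Chars.strip formula.toList
    if PySem.Chars.startswith f0 ['='] then
      -- result = ["="]; formula = formula[1:].strip()   (f0[1:] on a list is `drop 1`, exact)
      String.ofList (PySem.Chars.join ['\n'] (pvLoopA (PySem.Chars.strip (f0.drop 1)) [] 0 [['=']]))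
    else
      String.ofList (PySem.Chars.join ['\n'] (pvLoopA f0 [] 0 []))

-- ===== PORT B =====
-- B's _tokens: one pass collecting [text, delim, text, ..., text].
def pvTokensB : List Char → List Char → List (List Char) → List (List Char)
  | [], chunk, toks => toks ++ [chunk]
  | c :: rest, chunk, toks =>
      if c ∈ ['(', ')', ','] then pvTokensB rest [] (toks ++ [chunk, [c]])
      else pvTokensB rest (chunk ++ [c]) toks

-- B's `while k < len(toks): … k += 2`: consumes (chunk, delim) pairs; `_tokens` always
-- returns an odd-length alternating list, whose pair iteration is exactly this recursion.
def pvEmitB : List (List Char) → Int → List (List Char) → List (List Char)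
  | chunk :: d :: rest, ind, lines =>
      let t := PySem.Chars.strip chunk
      if d = ['('] then pvEmitB rest (ind + 4) (lines ++ [pvSpaces ind ++ t ++ ['(']])
      else if d = [','] then pvEmitB rest ind (lines ++ [pvSpaces ind ++ t ++ [',']])
      else
        let lines1 := if t.isEmpty then lines else lines ++ [pvSpaces ind ++ t]
        pvEmitB rest (ind - 4) (lines1 ++ [pvSpaces (ind - 4) ++ [')']])
  | [last], ind, lines =>
      let t := PySem.Chars.strip last
      if t.isEmpty then lines else lines ++ [pvSpaces ind ++ t]
  | [], _, lines => lines

def format_excel_formula_alt (formula : String) : String :=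
  if formula.toList = [] then ""
  else
    let s0 := PySem.Chars.strip formula.toList
    if PySem.Chars.startswith s0 ['='] then
      String.ofList (PySem.Chars.join ['\n']
        (pvEmitB (pvTokensB (PySem.Chars.strip (s0.drop 1)) [] []) 0 [['=']]))
    else
      String.ofList (PySem.Chars.join ['\n'] (pvEmitB (pvTokensB s0 [] []) 0 []))

-- ===== PRECONDITION & SPEC =====
def Spec_format_excel_formula (formula : String) (out : String) : Prop := out = format_excel_formula_alt formula
instance (formula : String) (out : String) : Decidable (Spec_format_excel_formula formula out) := by unfold Spec_format_excel_formula; infer_instance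

-- ===== CLAIM (what is proved, stated in full; the proofs are below) =====
def Claim_equal_format_excel_formula : Prop := ∀ (formula : String), Dom_format_excel_formula formula → Spec_format_excel_formula formula (format_excel_formula formula)

-- ===== LEMMAS AND PROOFS =====

lemma pvStrip_nil : PySem.Chars.strip ([] : List Char) = [] := by decide

-- the token accumulator only ever grows at the back
lemma pvTokensB_acc (cs : List Char) : ∀ (chunk : List Char) (toks : List (List Char)),
    pvTokensB cs chunk toks = toks ++ pvTokensB cs chunk [] := by
  induction cs with
  | nil => intro chunk toks; simp [pvTokensB]
  | cons c rest ih =>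
      intro chunk toks
      by_cases h : c ∈ ['(', ')', ',']
      · simp only [pvTokensB, if_pos h, List.nil_append]
        rw [ih [] [chunk, [c]], ih [] (toks ++ [chunk, [c]])]
        simp
      · simp only [pvTokensB, if_neg h]
        exact ih (chunk ++ [c]) toks

-- unfolding pvEmitB on a (chunk, delimiter) pair
lemma pvEmitB_cons₂ (chunk d : List Char) (rest : List (List Char)) (ind : Int) (lines : List (List Char)) :
    pvEmitB (chunk :: d :: rest) ind lines =
      (let t := PySem.Chars.strip chunk
       if d = ['('] then pvEmitB rest (ind + 4) (lines ++ [pvSpaces ind ++ t ++ ['(']])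
       else if d = [','] then pvEmitB rest ind (lines ++ [pvSpaces ind ++ t ++ [',']])
       else
         let lines1 := if t.isEmpty then lines else lines ++ [pvSpaces ind ++ t]
         pvEmitB rest (ind - 4) (lines1 ++ [pvSpaces (ind - 4) ++ [')']])) := by
  rw [pvEmitB]

-- A's single pass equals B's lex-then-emit, for any pending token / indent / lines
lemma pvLoopA_eq_emit (cs : List Char) : ∀ (cur : List Char) (ind : Int) (res : List (List Char)),
    pvLoopA cs cur ind res = pvEmitB (pvTokensB cs cur []) ind res := by
  induction cs with
  | nil =>
      intro cur ind res
      by_cases hc : cur.isEmpty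
      · simp at hc
        simp [pvLoopA, pvTokensB, pvEmitB, hc, pvStrip_nil]
      · simp [pvLoopA, pvTokensB, pvEmitB, hc]
  | cons c rest ih =>
      intro cur ind res
      by_cases h1 : c = '('
      · subst h1
        simp only [pvLoopA, pvTokensB, reduceIte]
        rw [if_pos (by decide : ('(' : Char) ∈ ['(', ')', ','])]
        simp only [List.nil_append]
        rw [pvTokensB_acc rest [] [cur, ['(']]]
        simp only [List.cons_append, List.nil_append]
        rw [ih [] (ind + 4), pvEmitB_cons₂]
        by_cases ht : (PySem.Chars.strip cur).isEmpty
        · simp at ht; simp [ht]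
        · simp [ht]
      · by_cases h2 : c = ')'
        · subst h2
          simp only [pvLoopA, pvTokensB, reduceIte, if_neg h1]
          rw [if_pos (by decide : (')' : Char) ∈ ['(', ')', ','])]
          simp only [List.nil_append]
          rw [pvTokensB_acc rest [] [cur, [')']]]
          simp only [List.cons_append, List.nil_append]
          rw [ih [] (ind - 4), pvEmitB_cons₂]
          by_cases hc : cur.isEmpty
          · simp at hc
            simp [hc, pvStrip_nil]
          · simp [hc]
        · by_cases h3 : c = ','
          · subst h3
            simp only [pvLoopA, pvTokensB, reduceIte, if_neg h1, if_neg h2]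
            rw [if_pos (by decide : (',' : Char) ∈ ['(', ')', ','])]
            simp only [List.nil_append]
            rw [pvTokensB_acc rest [] [cur, [',']]]
            simp only [List.cons_append, List.nil_append]
            rw [ih [] ind, pvEmitB_cons₂]
            by_cases ht : (PySem.Chars.strip cur).isEmpty
            · simp at ht; simp [ht]
            · simp [ht]
          · have hmem : ¬ c ∈ ['(', ')', ','] := by simp [h1, h2, h3]
            simp only [pvLoopA, if_neg h1, if_neg h2, if_neg h3, pvTokensB, if_neg hmem]
            exact ih (cur ++ [c]) ind res

-- ===== VERDICT (by name: the statement is the Claim_ definition above) =====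
theorem format_excel_formula_spec : Claim_equal_format_excel_formula := by
  intro formula _
  unfold Spec_format_excel_formula format_excel_formula format_excel_formula_alt
  by_cases h : formula.toList = []
  · simp [h]
  · simp only [if_neg h]
    by_cases he : PySem.Chars.startswith (PySem.Chars.strip formula.toList) ['=']
    · simp [he, pvLoopA_eq_emit]
    · simp [he, pvLoopA_eq_emit]
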